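-- pv_equiv track=rewrite | github.com/soyjubilado/AdventOfCode | 2022/prog202214.py | CornerToCorner
-- ===== SOURCE A (Python) =====
-- def CornerToCorner(here, there):
--   """Return a list of all the points from here to there, inclusive. Assumes the
--      two points are on a line. If not, and if you take out the assert, it fills
--      in all the points of the rectangle defined by the two corners."""
--   retval = []
--   x_here, y_here = here
--   x_there, y_there = there
--   assert x_here == x_there or y_here == y_there
--   x_start, x_end = (x_here, x_there) if x_there > x_here else (x_there, x_here)
--   y_start, y_end = (y_here, y_there) if y_there > y_here else (y_there, y_here)
--   for x in range(x_start, x_end + 1):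
--     for y in range(y_start, y_end + 1):
--       retval.append((x, y))
--   return retval
-- ===== SOURCE B (Python) =====
-- def CornerToCorner(here, there):
--   x_here, y_here = here
--   x_there, y_there = there
--   assert x_here == x_there or y_here == y_there
--   if x_here == x_there:
--     lo, hi = min(y_here, y_there), max(y_here, y_there)
--     return [(x_here, y) for y in range(lo, hi + 1)]
--   lo, hi = min(x_here, x_there), max(x_here, x_there)
--   return [(x, y_here) for x in range(lo, hi + 1)]
-- ===== Notes on version B (the rewrite author's own statement) =====
-- stated objective: simpler
-- what changed: Replaces the nested rectangle double-loop with a single comprehension along whichever axis varies (min/max instead of conditional swaps), branching on orientation.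
import Mathlib
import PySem

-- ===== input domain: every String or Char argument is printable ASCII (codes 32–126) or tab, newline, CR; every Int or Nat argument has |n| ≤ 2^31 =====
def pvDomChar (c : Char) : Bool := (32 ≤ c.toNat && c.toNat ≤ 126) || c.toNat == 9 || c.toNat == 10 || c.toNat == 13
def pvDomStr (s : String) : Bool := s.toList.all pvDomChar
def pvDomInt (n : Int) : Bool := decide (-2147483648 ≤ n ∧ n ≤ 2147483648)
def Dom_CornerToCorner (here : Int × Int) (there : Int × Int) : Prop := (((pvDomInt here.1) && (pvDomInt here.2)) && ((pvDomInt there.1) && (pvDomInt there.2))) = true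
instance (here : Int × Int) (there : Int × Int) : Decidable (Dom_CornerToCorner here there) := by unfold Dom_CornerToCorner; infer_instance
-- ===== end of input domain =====

-- B replaces A's nested rectangle double-loop by a single comprehension along whichever axis varies (objective: simpler).

-- ===== PORT A =====
def CornerToCorner (here : Int × Int) (there : Int × Int) : List (Int × Int) :=
  let x_here := here.1
  let y_here := here.2
  let x_there := there.1
  let y_there := there.2
  -- the assert is handled by Pre_CornerToCorner
  let xse := if x_there > x_here then (x_here, x_there) else (x_there, x_here)
  let yse := if y_there > y_here then (y_here, y_there) else (y_there, y_here)
  (PySem.List.pyRange xse.1 (xse.2 + 1) 1).foldl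
    (fun retval x =>
      (PySem.List.pyRange yse.1 (yse.2 + 1) 1).foldl
        (fun r y => r ++ [(x, y)]) retval) []

-- ===== PORT B =====
def CornerToCorner_alt (here : Int × Int) (there : Int × Int) : List (Int × Int) :=
  -- the assert is handled by Pre_CornerToCorner
  if here.1 = there.1 then
    (PySem.List.pyRange (min here.2 there.2) (max here.2 there.2 + 1) 1).map
      (fun y => (here.1, y))
  else
    (PySem.List.pyRange (min here.1 there.1) (max here.1 there.1 + 1) 1).map
      (fun x => (x, here.2))

-- ===== PRECONDITION & SPEC =====
-- Pre_ is exactly A's assert: the two corners share a coordinate (else AssertionError).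
def Pre_CornerToCorner (here : Int × Int) (there : Int × Int) : Prop :=
  here.1 = there.1 ∨ here.2 = there.2
instance (here : Int × Int) (there : Int × Int) : Decidable (Pre_CornerToCorner here there) := by
  unfold Pre_CornerToCorner; infer_instance

def pvWitness_CornerToCorner : (Int × Int) × (Int × Int) := ((3, 5), (3, 2))

def Spec_CornerToCorner (here : Int × Int) (there : Int × Int) (out : List (Int × Int)) : Prop := out = CornerToCorner_alt here there
instance (here : Int × Int) (there : Int × Int) (out : List (Int × Int)) : Decidable (Spec_CornerToCorner here there out) := by unfold Spec_CornerToCorner; infer_instance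

-- ===== CLAIM (what is proved, stated in full; the proofs are below) =====
def Claim_equal_CornerToCorner : Prop := ∀ (here : Int × Int) (there : Int × Int), Dom_CornerToCorner here there → Pre_CornerToCorner here there → Spec_CornerToCorner here there (CornerToCorner here there)

-- ===== LEMMAS AND PROOFS =====

lemma flatten_map_singleton {α β : Type} (f : α → β) :
    ∀ (l : List α), (l.map (fun y => [f y])).flatten = l.map f := by
  intro l; induction l with
  | nil => simp
  | cons y l ih => simp [ih]

theorem CornerToCorner_spec : Claim_equal_CornerToCorner := by
  intro here there _ hpre
  unfold Spec_CornerToCorner CornerToCorner CornerToCorner_alt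
  obtain ⟨x_here, y_here⟩ := here
  obtain ⟨x_there, y_there⟩ := there
  simp only
  rcases eq_or_ne x_here x_there with hx | hx
  · -- vertical (or single point): the x-range is the singleton [x_here]
    subst hx
    have hxr : PySem.List.pyRange
        (if x_here > x_here then (x_here, x_here) else (x_here, x_here)).1
        ((if x_here > x_here then (x_here, x_here) else (x_here, x_here)).2 + 1) 1
        = [x_here] := by
      simp [PySem.List.pyRange_one_singleton]
    simp only [gt_iff_lt, lt_self_iff_false, if_false] at *
    rw [PySem.List.pyRange_one_singleton]
    have hy : (if y_here < y_there then (y_here, y_there) else (y_there, y_here))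
        = (min y_here y_there, max y_here y_there) := by
      split_ifs with h <;> simp [min_def, max_def] <;> omega
    rw [hy]
    simp [List.foldl, flatten_map_singleton]
  · -- horizontal: the y-range is the singleton [y_here]
    have hy : y_here = y_there := by
      rcases hpre with h | h
      · exact absurd h hx
      · exact h
    subst hy
    have hxp : (if x_here < x_there then (x_here, x_there) else (x_there, x_here))
        = (min x_here x_there, max x_here x_there) := by
      split_ifs with h <;> simp [min_def, max_def] <;> omega
    simp only [gt_iff_lt, lt_self_iff_false, if_false, if_neg hx]
    rw [hxp, PySem.List.pyRange_one_singleton]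
    rw [show (fun (retval : List (Int × Int)) (x : Int) =>
          List.foldl (fun r y => r ++ [(x, y)]) retval [y_here])
        = (fun retval x => retval ++ [(x, y_here)]) from by
      funext retval x; simp [List.foldl]]
    simp [flatten_map_singleton]
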